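-- pv_equiv track=rewrite | github.com/yangyu0330/prompt_injection_fuzzing_third | prompt_injection_fuzzing/test1/prompt_injection_fuzzer.py | to_fullwidth_ascii
-- ===== SOURCE A (Python) =====
-- def to_fullwidth_ascii(text: str) -> str:
--     out = []
--     for ch in text:
--         if "!" <= ch <= "~":
--             out.append(chr(ord(ch) + 0xFEE0))
--         else:
--             out.append(ch)
--     return "".join(out)
-- ===== SOURCE B (Python) =====
-- def to_fullwidth_ascii(text: str) -> str:
--     # Divide and conquer: split the string in half, convert each half
--     # recursively, concatenate; single characters are shifted directly.
--     if len(text) == 0: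
--         return ""
--     if len(text) == 1:
--         return chr(ord(text) + 0xFEE0) if "!" <= text <= "~" else text
--     mid = len(text) // 2
--     return to_fullwidth_ascii(text[:mid]) + to_fullwidth_ascii(text[mid:])
-- ===== Notes on version B (the rewrite author's own statement) =====
-- stated objective: alternative
-- what changed: Replaces A's left-to-right loop with an accumulator list by a divide-and-conquer recursion that splits the string in half, converts each half recursively and concatenates the results.
import Mathlib
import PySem

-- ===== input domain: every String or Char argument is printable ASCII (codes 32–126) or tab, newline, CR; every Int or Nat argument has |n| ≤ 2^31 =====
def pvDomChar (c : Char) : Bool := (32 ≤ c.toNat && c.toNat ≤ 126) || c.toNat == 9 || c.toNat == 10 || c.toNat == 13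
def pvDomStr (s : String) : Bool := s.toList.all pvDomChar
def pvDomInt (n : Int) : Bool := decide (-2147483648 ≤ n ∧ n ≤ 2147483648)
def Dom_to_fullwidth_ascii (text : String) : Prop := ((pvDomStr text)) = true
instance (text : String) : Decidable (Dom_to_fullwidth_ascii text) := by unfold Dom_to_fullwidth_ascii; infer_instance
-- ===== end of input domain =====

-- B replaces A's left-to-right accumulator loop by a divide-and-conquer recursion on string halves (alternative decomposition, same result).

-- ===== PORT A =====
-- A: loop over the characters, appending either the shifted or the original char to an accumulator list, then join.
def to_fullwidth_ascii (text : String) : String :=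
  let out := text.toList.foldl
    (fun out ch =>
      if '!' ≤ ch ∧ ch ≤ '~' then out ++ [Char.ofNat (ch.toNat + 0xFEE0)]
      else out ++ [ch]) []
  String.ofList out

-- ===== PORT B =====
-- B: recursion on halves; base cases '' and a single character.
def fwRec (l : List Char) : List Char :=
  match l with
  | [] => []
  | [c] => [if '!' ≤ c ∧ c ≤ '~' then Char.ofNat (c.toNat + 0xFEE0) else c]
  | a :: b :: rest =>
      let mid := (a :: b :: rest).length / 2
      fwRec ((a :: b :: rest).take mid) ++ fwRec ((a :: b :: rest).drop mid)
termination_by l.length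
decreasing_by
  · simp [List.length_take]; omega
  · simp [List.length_drop]; omega

def to_fullwidth_ascii_alt (text : String) : String :=
  String.ofList (fwRec text.toList)

-- ===== PRECONDITION & SPEC =====
def Spec_to_fullwidth_ascii (text : String) (out : String) : Prop := out = to_fullwidth_ascii_alt text
instance (text : String) (out : String) : Decidable (Spec_to_fullwidth_ascii text out) := by unfold Spec_to_fullwidth_ascii; infer_instance

-- ===== CLAIM (what is proved, stated in full; the proofs are below) =====
def Claim_equal_to_fullwidth_ascii : Prop := ∀ (text : String), Dom_to_fullwidth_ascii text → Spec_to_fullwidth_ascii text (to_fullwidth_ascii text)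

-- ===== LEMMAS AND PROOFS =====
def fwStep (c : Char) : Char :=
  if '!' ≤ c ∧ c ≤ '~' then Char.ofNat (c.toNat + 0xFEE0) else c

lemma fwRec_eq_map (l : List Char) : fwRec l = l.map fwStep := by
  induction l using fwRec.induct with
  | case1 => simp [fwRec]
  | case2 c => simp [fwRec, fwStep]
  | case3 a b rest mid ih1 ih2 =>
      rw [fwRec, ih1, ih2, ← List.map_append, List.take_append_drop]

lemma foldA_eq_map (l : List Char) :
    l.foldl (fun out ch =>
      if '!' ≤ ch ∧ ch ≤ '~' then out ++ [Char.ofNat (ch.toNat + 0xFEE0)]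
      else out ++ [ch]) [] = l.map fwStep := by
  have hfun : (fun (out : List Char) ch =>
      if '!' ≤ ch ∧ ch ≤ '~' then out ++ [Char.ofNat (ch.toNat + 0xFEE0)]
      else out ++ [ch]) = fun (out : List Char) ch => out ++ [fwStep ch] := by
    funext out ch
    unfold fwStep
    split <;> rfl
  rw [hfun]
  simpa using PySem.List.foldl_append_singleton_eq_map (l := l) (f := fwStep) (acc := [])

-- ===== VERDICT (by name: the statement is the Claim_ definition above) =====
theorem to_fullwidth_ascii_spec : Claim_equal_to_fullwidth_ascii := by
  intro text _
  unfold Spec_to_fullwidth_ascii to_fullwidth_ascii to_fullwidth_ascii_alt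
  rw [foldA_eq_map, fwRec_eq_map]
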